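-- pv_equiv track=rewrite | github.com/violll/projectEuler | powerfulDigitSum.py | powerfulDigitSum
-- ===== SOURCE A (Python) =====
-- def digitSum(n):
--     res = 0
--     while n >= 1:
--         res += n % 10
--         n //= 10
--     return res
--
-- def powerfulDigitSum(maxA, maxB):
--     maxDigitSum = 0
--     for a in range(maxA-1, -1, -1):
--         for b in range(maxB-1, -1, -1):
--             n = a**b
--             ds = digitSum(n)
--             if ds > maxDigitSum: maxDigitSum = ds
--
--     return maxDigitSum
-- ===== SOURCE B (Python) =====
-- def powerfulDigitSum(maxA, maxB):
--     best = 0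
--     for a in range(maxA):
--         val = 1  # a**0
--         for _ in range(maxB):
--             ds = sum(int(c) for c in str(val))
--             if ds > best:
--                 best = ds
--             val *= a
--     return best
-- ===== Notes on version B (the rewrite author's own statement) =====
-- stated objective: alternative
-- what changed: B walks b upward keeping a running power val *= a instead of recomputing a**b from scratch at every inner step, iterates a ascending instead of descending, and takes the digit sum from the decimal string of val instead of a %10//10 extraction loop.
import Mathlib
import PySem

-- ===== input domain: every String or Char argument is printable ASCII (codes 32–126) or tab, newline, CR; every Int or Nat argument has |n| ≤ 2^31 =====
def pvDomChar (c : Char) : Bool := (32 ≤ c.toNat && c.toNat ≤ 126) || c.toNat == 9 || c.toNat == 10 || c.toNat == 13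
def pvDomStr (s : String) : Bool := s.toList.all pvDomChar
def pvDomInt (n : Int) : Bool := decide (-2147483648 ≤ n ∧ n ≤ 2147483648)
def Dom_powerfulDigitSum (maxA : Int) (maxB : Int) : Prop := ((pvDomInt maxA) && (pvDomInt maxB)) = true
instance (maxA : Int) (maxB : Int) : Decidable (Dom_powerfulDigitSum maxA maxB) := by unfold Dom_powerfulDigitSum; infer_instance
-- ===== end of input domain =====

-- B keeps a running power val *= a (instead of recomputing a**b from scratch each inner step),
-- iterates both ranges ascending, and takes the digit sum from str(val); same return value.

-- ===== PORT A =====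
-- digitSum's while-loop, with the accumulator `res` carried; n //= 10 strictly decreases n for n ≥ 1
def pvDigitSumLoop (res : Int) (n : Int) : Int :=
  if _h : 1 ≤ n then
    pvDigitSumLoop (res + PySem.Int.mod n 10) (PySem.Int.floordiv n 10)
  else res
termination_by n.toNat
decreasing_by
  rw [PySem.Int.floordiv_eq_ediv_of_pos (by norm_num)]
  omega

def pvDigitSum (n : Int) : Int := pvDigitSumLoop 0 n

def powerfulDigitSum (maxA : Int) (maxB : Int) : Int :=
  (PySem.List.pyRange (maxA - 1) (-1) (-1)).foldl (fun maxDigitSum a =>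
    (PySem.List.pyRange (maxB - 1) (-1) (-1)).foldl (fun maxDigitSum b =>
      let n := a ^ b.toNat   -- a**b; every b in the range is ≥ 0
      let ds := pvDigitSum n
      if ds > maxDigitSum then ds else maxDigitSum) maxDigitSum) 0

-- ===== PORT B =====
-- sum(int(c) for c in str(n)): int(c) on the decimal digit chars str() produces for the
-- nonnegative values B feeds it is exactly c.toNat - 48
def pvStrDigitSum (n : Int) : Int :=
  ((PySem.Int.toChars n).map (fun c => (c.toNat : Int) - 48)).sum

def powerfulDigitSum_alt (maxA : Int) (maxB : Int) : Int :=
  (PySem.List.pyRange 0 maxA 1).foldl (fun best a =>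
    ((PySem.List.pyRange 0 maxB 1).foldl (fun (st : Int × Int) _ =>
        let ds := pvStrDigitSum st.1
        (st.1 * a, if ds > st.2 then ds else st.2)) (1, best)).2) 0

-- ===== PRECONDITION & SPEC =====
def Spec_powerfulDigitSum (maxA : Int) (maxB : Int) (out : Int) : Prop := out = powerfulDigitSum_alt maxA maxB
instance (maxA : Int) (maxB : Int) (out : Int) : Decidable (Spec_powerfulDigitSum maxA maxB out) := by unfold Spec_powerfulDigitSum; infer_instance

-- ===== CLAIM (what is proved, stated in full; the proofs are below) =====
def Claim_equal_powerfulDigitSum : Prop := ∀ (maxA : Int) (maxB : Int), Dom_powerfulDigitSum maxA maxB → Spec_powerfulDigitSum maxA maxB (powerfulDigitSum maxA maxB)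

-- ===== LEMMAS AND PROOFS =====

-- the common mathematical digit sum (proof-side only)
def pvDnat (n : Nat) : Nat :=
  if n = 0 then 0 else n % 10 + pvDnat (n / 10)
termination_by n
decreasing_by exact Nat.div_lt_self (by omega) (by norm_num)

theorem pvDigitSumLoop_eq : ∀ (m : Nat) (res n : Int), 0 ≤ n → n.toNat = m →
    pvDigitSumLoop res n = res + (pvDnat m : Int) := by
  intro m
  induction m using Nat.strong_induction_on with
  | _ m ih =>
    intro res n hn hm
    rw [pvDigitSumLoop]
    split_ifs with h
    · have h10 : PySem.Int.floordiv n 10 = n / 10 := PySem.Int.floordiv_eq_ediv_of_pos (by norm_num)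
      have hmod : PySem.Int.mod n 10 = n % 10 := PySem.Int.mod_eq_emod_of_pos (by norm_num)
      have hge : 0 ≤ n / 10 := Int.ediv_nonneg hn (by norm_num)
      have hlt : (n / 10).toNat < m := by omega
      rw [hmod, h10, ih (n / 10).toNat hlt _ (n / 10) hge rfl]
      have hm0 : ¬ m = 0 := by omega
      have e1 : (n / 10).toNat = m / 10 := by omega
      rw [e1]
      conv_rhs => rw [pvDnat]
      rw [if_neg hm0]
      push_cast
      omega
    · have : m = 0 := by omega
      simp [this, pvDnat]

theorem pvDigitChar_toNat (d : Nat) (h : d < 10) : (Nat.digitChar d).toNat = 48 + d := by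
  interval_cases d <;> decide

theorem sum_toDigitsCore : ∀ (fuel n : Nat) (ds : List Char), n < fuel →
    ((Nat.toDigitsCore 10 fuel n ds).map (fun c => (c.toNat : Int) - 48)).sum
      = (pvDnat n : Int) + ((ds.map (fun c => (c.toNat : Int) - 48)).sum) := by
  intro fuel
  induction fuel with
  | zero => omega
  | succ fuel ih =>
    intro n ds h
    rw [Nat.toDigitsCore]
    have hd : (Nat.digitChar (n % 10)).toNat = 48 + n % 10 :=
      pvDigitChar_toNat _ (Nat.mod_lt _ (by norm_num))
    split_ifs with h0
    · -- n / 10 = 0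
      by_cases hn : n = 0
      · subst hn
        simp [pvDnat]
        decide
      · conv_rhs => rw [pvDnat]
        rw [if_neg hn, h0]
        simp [pvDnat, hd]
    · have hrec := ih (n / 10) ((Nat.digitChar (n % 10)) :: ds)
        (by have := Nat.div_lt_self (by omega : 0 < n) (by norm_num : 1 < 10); omega)
      rw [hrec]
      conv_rhs => rw [pvDnat]
      rw [if_neg (by omega : ¬ n = 0)]
      simp [hd]
      ring

theorem pvStrDigitSum_eq (n : Int) (hn : 0 ≤ n) : pvStrDigitSum n = (pvDnat n.toNat : Int) := by
  unfold pvStrDigitSum PySem.Int.toChars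
  rw [if_neg (by omega)]
  unfold Nat.toDigits
  rw [sum_toDigitsCore (n.toNat + 1) n.toNat [] (by omega)]
  simp

theorem pvDigitSum_eq_str (n : Int) (hn : 0 ≤ n) : pvDigitSum n = pvStrDigitSum n := by
  rw [pvStrDigitSum_eq n hn]
  unfold pvDigitSum
  rw [pvDigitSumLoop_eq n.toNat 0 n hn rfl]
  ring

-- ---- max-fold toolkit ----

theorem pvIfGtMax (x y : Int) : (if x > y then x else y) = max y x := by
  rw [max_comm, max_def]
  split_ifs <;> omega

theorem pvFoldlMaxMap (f : Int → Int) (l : List Int) (a : Int) :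
    l.foldl (fun acc x => max acc (f x)) a = (l.map f).foldl max a := by
  induction l generalizing a with
  | nil => rfl
  | cons x t ih => simp [List.foldl, ih]

theorem pvFoldlMaxFlat (m : Int → List Int) (l : List Int) (init : Int) :
    l.foldl (fun acc a => (m a).foldl max acc) init = (l.flatMap m).foldl max init := by
  induction l generalizing init with
  | nil => rfl
  | cons x t ih => simp [List.flatMap_cons, List.foldl_append, ih]

-- ---- B's inner loop invariant: val tracks v * a^k, best tracks the running max ----

theorem pvInnerB (a : Int) : ∀ (n : Nat) (v best : Int),
    ((List.range n).foldl (fun (st : Int × Int) _ =>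
        (st.1 * a, if pvStrDigitSum st.1 > st.2 then pvStrDigitSum st.1 else st.2)) (v, best))
      = (v * a ^ n, ((List.range n).map (fun k => pvStrDigitSum (v * a ^ k))).foldl max best) := by
  intro n
  induction n with
  | zero => simp
  | succ n ih =>
    intro v best
    rw [List.range_succ]
    simp only [List.foldl_append, List.map_append, List.foldl_cons, List.foldl_nil,
      List.map_cons, List.map_nil, ih]
    rw [pvIfGtMax]
    simp [pow_succ, mul_assoc]

-- ---- canonical forms of both ports ----

theorem pvA_canon (maxA maxB : Int) :
    powerfulDigitSum maxA maxB =
      (((PySem.List.pyRange 0 maxA 1).reverse.flatMap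
          (fun a => ((List.range maxB.toNat).map (fun k => pvDigitSum (a ^ k))).reverse)).foldl max 0) := by
  unfold powerfulDigitSum
  have hA : PySem.List.pyRange (maxA - 1) (-1) (-1) = (PySem.List.pyRange 0 maxA 1).reverse := by
    rw [PySem.List.pyRange_neg_one_eq_reverse]; norm_num
  have hB : PySem.List.pyRange (maxB - 1) (-1) (-1) = (PySem.List.pyRange 0 maxB 1).reverse := by
    rw [PySem.List.pyRange_neg_one_eq_reverse]; norm_num
  rw [hA, hB]
  simp only [pvIfGtMax]
  have hcol : ∀ acc a, ((PySem.List.pyRange 0 maxB 1).reverse.foldl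
      (fun acc b => max acc (pvDigitSum (a ^ b.toNat))) acc)
      = (((List.range maxB.toNat).map (fun k => pvDigitSum (a ^ k))).reverse).foldl max acc := by
    intro acc a
    rw [pvFoldlMaxMap, ← List.map_reverse]
    congr 1
    rw [PySem.List.pyRange_zero, ← List.map_reverse, List.map_map]
    simp
  simp only [hcol]
  rw [pvFoldlMaxFlat]

theorem pvB_canon (maxA maxB : Int) :
    powerfulDigitSum_alt maxA maxB =
      (((PySem.List.pyRange 0 maxA 1).flatMap
          (fun a => (List.range maxB.toNat).map (fun k => pvStrDigitSum (a ^ k)))).foldl max 0) := by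
  unfold powerfulDigitSum_alt
  have hinner : ∀ best a, ((PySem.List.pyRange 0 maxB 1).foldl (fun (st : Int × Int) _ =>
        (st.1 * a, if pvStrDigitSum st.1 > st.2 then pvStrDigitSum st.1 else st.2)) (1, best)).2
      = ((List.range maxB.toNat).map (fun k => pvStrDigitSum (a ^ k))).foldl max best := by
    intro best a
    rw [PySem.List.pyRange_zero, List.foldl_map, pvInnerB a maxB.toNat 1 best]
    simp
  simp only [hinner]
  rw [pvFoldlMaxFlat]

-- ===== VERDICT (by name: the statement is the Claim_ definition above) =====
theorem powerfulDigitSum_spec : Claim_equal_powerfulDigitSum := by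
  intro maxA maxB _
  unfold Spec_powerfulDigitSum
  rw [pvA_canon, pvB_canon]
  have hperm : ((PySem.List.pyRange 0 maxA 1).reverse.flatMap
      (fun a => ((List.range maxB.toNat).map (fun k => pvDigitSum (a ^ k))).reverse)).Perm
      ((PySem.List.pyRange 0 maxA 1).flatMap
      (fun a => (List.range maxB.toNat).map (fun k => pvStrDigitSum (a ^ k)))) := by
    apply List.Perm.flatMap ((PySem.List.pyRange 0 maxA 1).reverse_perm)
    intro a ha
    have ha0 : 0 ≤ a := by
      rw [List.mem_reverse, PySem.List.mem_pyRange_one] at ha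
      exact ha.1
    have e : (List.range maxB.toNat).map (fun k => pvDigitSum (a ^ k))
           = (List.range maxB.toNat).map (fun k => pvStrDigitSum (a ^ k)) :=
      List.map_congr_left (fun k _ => pvDigitSum_eq_str _ (pow_nonneg ha0 k))
    exact e ▸ List.reverse_perm _
  exact List.Perm.foldl_eq (f := (max : Int → Int → Int)) hperm 0
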